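-- pv_equiv track=rewrite | github.com/rodrigocorreiaist/Fundamentos-de-Programa-o | FP2324P2.py | obtem_ultima_intersecao
-- ===== SOURCE A (Python) =====
-- def obtem_ultima_intersecao(g):
--     """Função que obtém a última interseção do goban"""
--     associacao = {}
--     letra = "A"
--
--     for tuplo in g:
--         associacao[letra] = tuplo
--         letra = chr(ord(letra) + 1)
--
--     ultimaletra = chr(ord(letra) - 1)
--     ultelemento = len(g[0])
--     intersecao = (ultimaletra, ultelemento)
--
--     return intersecao
-- ===== SOURCE B (Python) =====
-- def obtem_ultima_intersecao(g):
--     """Função que obtém a última interseção do goban"""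
--     return (chr(ord("A") + len(g) - 1), len(g[0]))
-- ===== Notes on version B (the rewrite author's own statement) =====
-- stated objective: simpler
-- what changed: Drops the dict-building loop: the last row label is computed in closed form as chr(ord('A') + len(g) - 1) and the column count as len(g[0]).
import Mathlib
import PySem

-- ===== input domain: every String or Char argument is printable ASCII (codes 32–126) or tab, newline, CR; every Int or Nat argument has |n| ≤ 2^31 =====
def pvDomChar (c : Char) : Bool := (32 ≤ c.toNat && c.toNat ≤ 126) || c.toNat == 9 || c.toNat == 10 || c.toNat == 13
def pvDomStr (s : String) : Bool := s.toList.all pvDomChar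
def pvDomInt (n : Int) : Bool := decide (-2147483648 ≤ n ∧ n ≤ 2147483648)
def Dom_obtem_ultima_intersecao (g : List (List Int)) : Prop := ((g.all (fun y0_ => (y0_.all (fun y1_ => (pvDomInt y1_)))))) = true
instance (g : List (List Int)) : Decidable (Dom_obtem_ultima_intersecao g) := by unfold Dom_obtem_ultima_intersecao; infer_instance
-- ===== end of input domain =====

-- B replaces A's dict-building loop by the closed form chr(ord('A')+len(g)-1) for the last label; return values only.
-- ===== PORT A =====
-- letra is tracked as its Nat character code (ord letra); chr/ord are exact on this domain.
def obtem_ultima_intersecao (g : List (List Int)) : String × Int :=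
  let st := g.foldl
    (fun (st : PySem.Dict String (List Int) × Nat) tuplo =>
      (st.1.insert (String.ofList [Char.ofNat st.2]) tuplo, st.2 + 1))
    ((PySem.Dict.empty : PySem.Dict String (List Int)), 65)
  let ultimaletra := String.ofList [Char.ofNat (st.2 - 1)]
  -- g[0] raises IndexError on empty g; Pre_ excludes that, .getD [] is never reached inside Pre_
  let ultelemento : Int := ((PySem.List.pyGet? g 0).getD []).length
  (ultimaletra, ultelemento)

-- ===== PORT B =====
def obtem_ultima_intersecao_alt (g : List (List Int)) : String × Int :=
  (String.ofList [Char.ofNat (65 + g.length - 1)],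
   (((PySem.List.pyGet? g 0).getD []).length : Int))

-- ===== PRECONDITION & SPEC =====
-- Pre_ excludes exactly the empty goban, on which both A and B raise IndexError at len(g[0]).
def Pre_obtem_ultima_intersecao (g : List (List Int)) : Prop := g ≠ []
instance (g : List (List Int)) : Decidable (Pre_obtem_ultima_intersecao g) := by unfold Pre_obtem_ultima_intersecao; infer_instance
def pvWitness_obtem_ultima_intersecao : List (List Int) := [[0, 1], [2, 3]]
def Spec_obtem_ultima_intersecao (g : List (List Int)) (out : String × Int) : Prop := out = obtem_ultima_intersecao_alt g
instance (g : List (List Int)) (out : String × Int) : Decidable (Spec_obtem_ultima_intersecao g out) := by unfold Spec_obtem_ultima_intersecao; infer_instance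

-- ===== CLAIM (what is proved, stated in full; the proofs are below) =====
def Claim_equal_obtem_ultima_intersecao : Prop := ∀ (g : List (List Int)), Dom_obtem_ultima_intersecao g → Pre_obtem_ultima_intersecao g → Spec_obtem_ultima_intersecao g (obtem_ultima_intersecao g)

-- ===== LEMMAS AND PROOFS =====
theorem pv_foldl_snd (g : List (List Int)) (d : PySem.Dict String (List Int)) (c : Nat) :
    (g.foldl
      (fun (st : PySem.Dict String (List Int) × Nat) tuplo =>
        (st.1.insert (String.ofList [Char.ofNat st.2]) tuplo, st.2 + 1))
      (d, c)).2 = c + g.length := by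
  induction g generalizing d c with
  | nil => simp
  | cons h t ih => simp [List.foldl, ih]; omega

-- ===== VERDICT (by name: the statement is the Claim_ definition above) =====
theorem obtem_ultima_intersecao_spec : Claim_equal_obtem_ultima_intersecao := by
  intro g _ _
  unfold Spec_obtem_ultima_intersecao obtem_ultima_intersecao obtem_ultima_intersecao_alt
  simp [pv_foldl_snd]
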